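-- pv_equiv track=rewrite | github.com/a-gavriel/Python-Games | Clases/Clases-Ejecicios/c08.py | cuales2_aux
-- ===== SOURCE A (Python) =====
-- def cuales2_aux(num, resultado):
--     if num == 0:
--         return resultado
--     else:
--         ultimo = num%10
--         if ultimo < 5:
--             nuevo = [ultimo]
--             nuevo.extend(resultado)
--             return cuales2_aux(num//10, nuevo)
--         else:
--             return cuales2_aux(num//10, resultado)
-- ===== SOURCE B (Python) =====
-- def cuales2_aux(num, resultado):
--     if num == 0:
--         return resultado
--     digits = []
--     while num != 0:
--         ultimo = num % 10
--         if ultimo < 5: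
--             digits.append(ultimo)
--         num //= 10
--     digits.reverse()
--     return digits + resultado
-- ===== Notes on version B (the rewrite author's own statement) =====
-- stated objective: alternative
-- what changed: Replaces A's tail recursion that prepends each kept digit with an iterative while-loop that appends kept digits to a local list, reverses it once, and concatenates it in front of resultado.
import Mathlib
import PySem

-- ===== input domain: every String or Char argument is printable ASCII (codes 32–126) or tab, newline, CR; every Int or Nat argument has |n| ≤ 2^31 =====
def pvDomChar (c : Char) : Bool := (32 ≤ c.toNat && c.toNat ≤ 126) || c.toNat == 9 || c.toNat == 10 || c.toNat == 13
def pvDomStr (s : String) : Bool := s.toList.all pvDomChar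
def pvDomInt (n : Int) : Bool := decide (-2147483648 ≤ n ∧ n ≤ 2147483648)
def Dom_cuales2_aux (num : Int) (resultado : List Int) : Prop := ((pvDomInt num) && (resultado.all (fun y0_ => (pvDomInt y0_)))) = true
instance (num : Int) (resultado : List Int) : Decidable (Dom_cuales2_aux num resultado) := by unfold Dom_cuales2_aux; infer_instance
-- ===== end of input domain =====

-- B replaces A's tail recursion (prepending kept digits) by an iterative loop that appends
-- kept digits to a local list, reverses it once and concatenates it before resultado (alternative decomposition).


-- termination helper (cited by both ports' decreasing_by)
theorem pv_floordiv10_toNat_lt (n : Int) (h : ¬ n ≤ 0) : (PySem.Int.floordiv n 10).toNat < n.toNat := by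
  rw [PySem.Int.floordiv_eq_ediv_of_pos (by omega)]
  omega

-- ===== PORT A =====
-- the 'n ≤ 0' guard only makes the recursion total; Pre_ restricts to 0 ≤ num
def cuales2_aux (num : Int) (resultado : List Int) : List Int :=
  if num ≤ 0 then resultado
  else
    let ultimo := PySem.Int.mod num 10
    if ultimo < 5 then
      cuales2_aux (PySem.Int.floordiv num 10) (ultimo :: resultado)
    else
      cuales2_aux (PySem.Int.floordiv num 10) resultado
termination_by num.toNat
decreasing_by all_goals exact pv_floordiv10_toNat_lt num (by assumption)

-- ===== PORT B =====
-- the while-loop: digits appended least-significant first ('num ≤ 0' guard = totality only)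
def cuales2Loop (num : Int) (digits : List Int) : List Int :=
  if num ≤ 0 then digits
  else
    let ultimo := PySem.Int.mod num 10
    cuales2Loop (PySem.Int.floordiv num 10)
      (if ultimo < 5 then digits ++ [ultimo] else digits)
termination_by num.toNat
decreasing_by exact pv_floordiv10_toNat_lt num (by assumption)

def cuales2_aux_alt (num : Int) (resultado : List Int) : List Int :=
  if num = 0 then resultado
  else (cuales2Loop num []).reverse ++ resultado

-- ===== PRECONDITION & SPEC =====
-- Pre_ excludes negative num, on which the Python A raises RecursionError (and B loops forever)
def Pre_cuales2_aux (num : Int) (resultado : List Int) : Prop := 0 ≤ num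
instance (num : Int) (resultado : List Int) : Decidable (Pre_cuales2_aux num resultado) := by unfold Pre_cuales2_aux; infer_instance
def pvWitness_cuales2_aux : Int × List Int := (473, [9])

def Spec_cuales2_aux (num : Int) (resultado : List Int) (out : List Int) : Prop := out = cuales2_aux_alt num resultado
instance (num : Int) (resultado : List Int) (out : List Int) : Decidable (Spec_cuales2_aux num resultado out) := by unfold Spec_cuales2_aux; infer_instance

-- ===== CLAIM (what is proved, stated in full; the proofs are below) =====
def Claim_equal_cuales2_aux : Prop := ∀ (num : Int) (resultado : List Int), Dom_cuales2_aux num resultado → Pre_cuales2_aux num resultado → Spec_cuales2_aux num resultado (cuales2_aux num resultado)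

-- ===== LEMMAS AND PROOFS =====

-- invariant: A applied to (acc.reverse ++ res) is the loop's accumulator, reversed, before res
theorem cuales2_invariant (k : Nat) : ∀ (num : Int), num.toNat ≤ k →
    ∀ (acc res : List Int),
      (cuales2Loop num acc).reverse ++ res = cuales2_aux num (acc.reverse ++ res) := by
  induction k with
  | zero =>
      intro num h acc res
      rw [cuales2Loop, cuales2_aux]
      have : num ≤ 0 := by omega
      simp [this]
  | succ k ih =>
      intro num h acc res
      rw [cuales2Loop, cuales2_aux]
      by_cases h0 : num ≤ 0
      · simp [h0]
      · simp only [h0, if_false]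
        have hlt := pv_floordiv10_toNat_lt num h0
        by_cases h5 : PySem.Int.mod num 10 < 5
        · simp only [h5, if_pos]
          rw [ih _ (by omega) (acc ++ [PySem.Int.mod num 10]) res]
          simp
        · simp only [h5, if_false]
          exact ih _ (by omega) acc res

-- ===== VERDICT (by name: the statement is the Claim_ definition above) =====
theorem cuales2_aux_spec : Claim_equal_cuales2_aux := by
  intro num resultado _ _
  unfold Spec_cuales2_aux cuales2_aux_alt
  by_cases h0 : num = 0
  · subst h0
    rw [cuales2_aux]
    simp
  · simp only [h0, if_false]
    have := cuales2_invariant num.toNat num (le_refl _) [] resultado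
    simpa using this.symm
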